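-- pv_equiv track=rewrite | github.com/awsdevs/codebert-repo-chunker | codebert-repo-chunker/src/chunkers/build/docker_chunker.py | _suggest_optimizations
-- ===== SOURCE A (Python) =====
-- from typing import List, Dict, Any, Optional, Tuple, Set
-- from dataclasses import dataclass, field
--
-- @dataclass
-- class DockerLayer:
--     """Represents a Docker layer"""
--     instruction: str
--     arguments: str
--     line_number: int
--     creates_layer: bool
--     estimated_size: int
--     cache_bust_probability: float  # Likelihood of cache invalidation
--
-- def _suggest_optimizations(instructions: List[Dict[str, Any]],
--                           layers: List[DockerLayer]) -> List[str]:
--     """Suggest Dockerfile optimizations"""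
--     suggestions = []
--
--     # Check for multiple RUN instructions that could be combined
--     run_instructions = [i for i in instructions if i['instruction'] == 'RUN']
--     if len(run_instructions) > 3:
--         suggestions.append("Consider combining multiple RUN instructions to reduce layers")
--
--     # Check for package manager cleanup
--     for inst in instructions:
--         if inst['instruction'] == 'RUN':
--             args = inst['arguments'].lower()
--             if 'apt-get install' in args and 'rm -rf /var/lib/apt/lists/*' not in args:
--                 suggestions.append("Add 'rm -rf /var/lib/apt/lists/*' to apt-get install commands")
--             if 'yum install' in args and 'yum clean all' not in args:
--                 suggestions.append("Add 'yum clean all' after yum install commands")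
--
--     # Check for COPY before dependency installation
--     copy_indices = [i for i, inst in enumerate(instructions) if inst['instruction'] == 'COPY']
--     run_indices = [i for i, inst in enumerate(instructions) if inst['instruction'] == 'RUN']
--
--     if copy_indices and run_indices:
--         first_copy = min(copy_indices)
--         dependency_runs = [i for i in run_indices
--                          if any(pkg in instructions[i]['arguments'].lower()
--                                for pkg in ['install', 'npm', 'pip', 'maven', 'gradle'])]
--         if dependency_runs and first_copy < min(dependency_runs):
--             suggestions.append("Copy dependency files before source code for better caching")
--
--     # Check for USER instruction
--     if not any(inst['instruction'] == 'USER' for inst in instructions):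
--         suggestions.append("Consider running as non-root user for security")
--
--     # Check for HEALTHCHECK
--     if not any(inst['instruction'] == 'HEALTHCHECK' for inst in instructions):
--         suggestions.append("Consider adding HEALTHCHECK for container health monitoring")
--
--     # Check for .dockerignore usage hint
--     add_copy_count = sum(1 for inst in instructions
--                        if inst['instruction'] in ['ADD', 'COPY'])
--     if add_copy_count > 5:
--         suggestions.append("Ensure .dockerignore is properly configured to exclude unnecessary files")
--
--     return suggestions
-- ===== SOURCE B (Python) =====
-- def _suggest_optimizations(instructions, layers):
--     """Suggest Dockerfile optimizations (single-pass accumulation, then emit)."""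
--     run_count = 0
--     add_copy_count = 0
--     seen_copy = False
--     dep_state = None  # None until the first dependency-installing RUN; then: was a COPY seen before it?
--     has_user = False
--     has_healthcheck = False
--     pkg_msgs = []
--     for inst in instructions:
--         kind = inst['instruction']
--         if kind == 'RUN':
--             run_count += 1
--             args = inst['arguments'].lower()
--             if 'apt-get install' in args and 'rm -rf /var/lib/apt/lists/*' not in args:
--                 pkg_msgs.append("Add 'rm -rf /var/lib/apt/lists/*' to apt-get install commands")
--             if 'yum install' in args and 'yum clean all' not in args:
--                 pkg_msgs.append("Add 'yum clean all' after yum install commands")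
--             if dep_state is None and any(p in args for p in ('install', 'npm', 'pip', 'maven', 'gradle')):
--                 dep_state = seen_copy
--         elif kind == 'COPY':
--             seen_copy = True
--             add_copy_count += 1
--         elif kind == 'ADD':
--             add_copy_count += 1
--         elif kind == 'USER':
--             has_user = True
--         elif kind == 'HEALTHCHECK':
--             has_healthcheck = True
--     out = []
--     if run_count > 3:
--         out.append("Consider combining multiple RUN instructions to reduce layers")
--     out.extend(pkg_msgs)
--     if dep_state:
--         out.append("Copy dependency files before source code for better caching")
--     if not has_user:
--         out.append("Consider running as non-root user for security")
--     if not has_healthcheck: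
--         out.append("Consider adding HEALTHCHECK for container health monitoring")
--     if add_copy_count > 5:
--         out.append("Ensure .dockerignore is properly configured to exclude unnecessary files")
--     return out
-- ===== Notes on version B (the rewrite author's own statement) =====
-- stated objective: alternative
-- what changed: Replaces A's six separate scans (filters, enumerate+min index arithmetic, any-scans, a count) with a single pass that accumulates counts and flags, replacing the min-index COPY-vs-dependency comparison with a seen-copy-at-first-dependency flag, then emits the suggestions from the final state.
import Mathlib
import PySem

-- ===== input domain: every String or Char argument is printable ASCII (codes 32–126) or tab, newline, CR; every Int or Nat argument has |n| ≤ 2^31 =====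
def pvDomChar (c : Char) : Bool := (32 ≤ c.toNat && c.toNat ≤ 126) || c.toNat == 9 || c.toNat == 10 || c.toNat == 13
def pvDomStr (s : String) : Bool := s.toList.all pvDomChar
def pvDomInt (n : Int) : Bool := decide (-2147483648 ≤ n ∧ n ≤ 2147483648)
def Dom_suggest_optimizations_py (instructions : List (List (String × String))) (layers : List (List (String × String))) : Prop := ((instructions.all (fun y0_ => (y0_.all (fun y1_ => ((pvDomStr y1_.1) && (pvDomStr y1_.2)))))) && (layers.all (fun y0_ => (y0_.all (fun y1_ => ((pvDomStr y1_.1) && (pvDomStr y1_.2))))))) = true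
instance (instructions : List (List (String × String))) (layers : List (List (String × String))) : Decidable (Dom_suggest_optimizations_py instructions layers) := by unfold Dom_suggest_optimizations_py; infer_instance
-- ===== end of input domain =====

-- B replaces A's six separate scans (filters, enumerate+min index comparison, any-scans, a count)
-- with ONE pass accumulating counts/flags (the COPY-before-dependency test becomes a
-- "COPY seen before the first dependency RUN" flag), then emits the suggestions in A's order.
-- Same cost class; objective: alternative decomposition.

-- shared helpers: Python dict access d['instruction'] / d['arguments'] (KeyError excluded by Pre_)
def pvInstOf (d : List (String × String)) : String := ((PySem.Dict.mk d).get? "instruction").getD ""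
def pvArgsOf (d : List (String × String)) : String := ((PySem.Dict.mk d).get? "arguments").getD ""
def msgCombine : String := "Consider combining multiple RUN instructions to reduce layers"
def msgApt : String := "Add 'rm -rf /var/lib/apt/lists/*' to apt-get install commands"
def msgYum : String := "Add 'yum clean all' after yum install commands"
def msgCopyDep : String := "Copy dependency files before source code for better caching"
def msgUser : String := "Consider running as non-root user for security"
def msgHealth : String := "Consider adding HEALTHCHECK for container health monitoring"
def msgIgnore : String := "Ensure .dockerignore is properly configured to exclude unnecessary files"
def pvDepPkgs : List String := ["install", "npm", "pip", "maven", "gradle"]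

-- ===== PORT A =====
def suggest_optimizations_py (instructions : List (List (String × String))) (layers : List (List (String × String))) : List String :=
  let run_instructions := instructions.filter (fun i => pvInstOf i == "RUN")
  let s1 := if run_instructions.length > 3 then [msgCombine] else []
  let s2 := instructions.foldl (fun acc inst =>
      if pvInstOf inst == "RUN" then
        let args := PySem.Str.lower (pvArgsOf inst)
        let acc := if PySem.Str.isIn "apt-get install" args && !(PySem.Str.isIn "rm -rf /var/lib/apt/lists/*" args) then acc ++ [msgApt] else acc
        if PySem.Str.isIn "yum install" args && !(PySem.Str.isIn "yum clean all" args) then acc ++ [msgYum] else acc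
      else acc) s1
  let copy_indices := ((PySem.List.enumerate instructions).filter (fun p => pvInstOf p.2 == "COPY")).map (·.1)
  let run_indices := ((PySem.List.enumerate instructions).filter (fun p => pvInstOf p.2 == "RUN")).map (·.1)
  let s3 :=
    if !copy_indices.isEmpty && !run_indices.isEmpty then
      let first_copy := (PySem.List.min? copy_indices (fun x => x)).getD 0
      let dependency_runs := run_indices.filter (fun i =>
        pvDepPkgs.any (fun pkg => PySem.Str.isIn pkg (PySem.Str.lower (((PySem.List.pyGet? instructions i).map pvArgsOf).getD ""))))
      if !dependency_runs.isEmpty && first_copy < (PySem.List.min? dependency_runs (fun x => x)).getD 0 then s2 ++ [msgCopyDep] else s2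
    else s2
  let s4 := if !(instructions.any (fun inst => pvInstOf inst == "USER")) then s3 ++ [msgUser] else s3
  let s5 := if !(instructions.any (fun inst => pvInstOf inst == "HEALTHCHECK")) then s4 ++ [msgHealth] else s4
  let add_copy_count := instructions.countP (fun inst => (["ADD", "COPY"] : List String).contains (pvInstOf inst))
  if add_copy_count > 5 then s5 ++ [msgIgnore] else s5

-- ===== PORT B =====
structure BState where
  rc : Nat
  pm : List String
  sc : Bool
  dep : Option Bool
  hu : Bool
  hh : Bool
  ac : Nat
deriving Repr, DecidableEq

def bstep (st : BState) (inst : List (String × String)) : BState :=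
  let kind := pvInstOf inst
  if kind == "RUN" then
    let args := PySem.Str.lower (pvArgsOf inst)
    let pm := if PySem.Str.isIn "apt-get install" args && !(PySem.Str.isIn "rm -rf /var/lib/apt/lists/*" args) then st.pm ++ [msgApt] else st.pm
    let pm := if PySem.Str.isIn "yum install" args && !(PySem.Str.isIn "yum clean all" args) then pm ++ [msgYum] else pm
    let dep := if st.dep.isNone && pvDepPkgs.any (fun p => PySem.Str.isIn p args) then some st.sc else st.dep
    { st with rc := st.rc + 1, pm := pm, dep := dep }
  else if kind == "COPY" then { st with sc := true, ac := st.ac + 1 }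
  else if kind == "ADD" then { st with ac := st.ac + 1 }
  else if kind == "USER" then { st with hu := true }
  else if kind == "HEALTHCHECK" then { st with hh := true }
  else st

def suggest_optimizations_py_alt (instructions : List (List (String × String))) (layers : List (List (String × String))) : List String :=
  let st := instructions.foldl bstep ⟨0, [], false, none, false, false, 0⟩
  (if st.rc > 3 then [msgCombine] else [])
    ++ st.pm
    ++ (if st.dep.getD false then [msgCopyDep] else [])
    ++ (if !st.hu then [msgUser] else [])
    ++ (if !st.hh then [msgHealth] else [])
    ++ (if st.ac > 5 then [msgIgnore] else [])

-- ===== PRECONDITION & SPEC =====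
-- Pre_ excludes exactly the inputs where Python A raises KeyError: an instruction dict without
-- an 'instruction' key, or a RUN instruction without an 'arguments' key.
def Pre_suggest_optimizations_py (instructions : List (List (String × String))) (layers : List (List (String × String))) : Prop :=
  ∀ inst ∈ instructions, ((PySem.Dict.mk inst).get? "instruction").isSome = true ∧
    (pvInstOf inst = "RUN" → ((PySem.Dict.mk inst).get? "arguments").isSome = true)
instance (instructions : List (List (String × String))) (layers : List (List (String × String))) : Decidable (Pre_suggest_optimizations_py instructions layers) := by unfold Pre_suggest_optimizations_py; infer_instance
def pvWitness_suggest_optimizations_py : (List (List (String × String))) × (List (List (String × String))) :=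
  ([[("instruction", "RUN"), ("arguments", "apt-get install curl")]], [])
def Spec_suggest_optimizations_py (instructions : List (List (String × String))) (layers : List (List (String × String))) (out : List String) : Prop := out = suggest_optimizations_py_alt instructions layers
instance (instructions : List (List (String × String))) (layers : List (List (String × String))) (out : List String) : Decidable (Spec_suggest_optimizations_py instructions layers out) := by unfold Spec_suggest_optimizations_py; infer_instance

-- ===== CLAIM (what is proved, stated in full; the proofs are below) =====
def Claim_equal_suggest_optimizations_py : Prop := ∀ (instructions : List (List (String × String))) (layers : List (List (String × String))), Dom_suggest_optimizations_py instructions layers → Pre_suggest_optimizations_py instructions layers → Spec_suggest_optimizations_py instructions layers (suggest_optimizations_py instructions layers)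

-- ===== LEMMAS AND PROOFS =====

-- per-instruction classifiers (proof-only)
def isRun (x : List (String × String)) : Bool := pvInstOf x == "RUN"
def isCopy (x : List (String × String)) : Bool := pvInstOf x == "COPY"
def isUser (x : List (String × String)) : Bool := pvInstOf x == "USER"
def isHealth (x : List (String × String)) : Bool := pvInstOf x == "HEALTHCHECK"
def isAddCopy (x : List (String × String)) : Bool := (["ADD", "COPY"] : List String).contains (pvInstOf x)
def isDepArgs (x : List (String × String)) : Bool := pvDepPkgs.any (fun p => PySem.Str.isIn p (PySem.Str.lower (pvArgsOf x)))
def isDep (x : List (String × String)) : Bool := isRun x && isDepArgs x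
def pkgMsgs (x : List (String × String)) : List String :=
  if isRun x then
    (if PySem.Str.isIn "apt-get install" (PySem.Str.lower (pvArgsOf x)) && !(PySem.Str.isIn "rm -rf /var/lib/apt/lists/*" (PySem.Str.lower (pvArgsOf x))) then [msgApt] else [])
      ++ (if PySem.Str.isIn "yum install" (PySem.Str.lower (pvArgsOf x)) && !(PySem.Str.isIn "yum clean all" (PySem.Str.lower (pvArgsOf x))) then [msgYum] else [])
  else []
def depScan (sc : Bool) : List (List (String × String)) → Option Bool
  | [] => none
  | x :: xs => if isDep x then some sc else depScan (sc || isCopy x) xs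

theorem foldl_bstep (l : List (List (String × String))) (st : BState) :
    l.foldl bstep st =
      ⟨st.rc + l.countP isRun, st.pm ++ l.flatMap pkgMsgs, st.sc || l.any isCopy,
        (match st.dep with | some b => some b | none => depScan st.sc l),
        st.hu || l.any isUser, st.hh || l.any isHealth, st.ac + l.countP isAddCopy⟩ := by
  induction l generalizing st with
  | nil => cases st with | mk rc pm sc dep hu hh ac => cases dep <;> simp [depScan]
  | cons x xs ih =>
    rw [List.foldl_cons, ih]
    cases st with | mk rc pm sc dep hu hh ac =>
    simp only [bstep]
    by_cases h1 : pvInstOf x = "RUN"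
    · have hr : isRun x = true := by simp [isRun, h1]
      have hc : isCopy x = false := by simp [isCopy, h1]
      have hu : isUser x = false := by simp [isUser, h1]
      have hh : isHealth x = false := by simp [isHealth, h1]
      have hac : isAddCopy x = false := by simp [isAddCopy, h1]
      by_cases hdep : (pvDepPkgs.any fun p => PySem.Str.isIn p (PySem.Str.lower (pvArgsOf x))) = true
      · have hd : isDep x = true := by
          simp only [isDep, isDepArgs, hr, Bool.true_and]; exact hdep
        simp only [h1, beq_self_eq_true, if_true, List.countP_cons, hr, hc, hu, hh, hac,
          List.flatMap_cons, List.any_cons, pkgMsgs, depScan, hd, hdep, Bool.false_or,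
          Option.isNone_none, Option.isNone_some, Bool.true_and, Bool.false_and, Bool.and_true,
          Bool.and_false, if_true, if_false]
        cases dep <;> split_ifs <;>
          first
            | omega
            | rfl
            | (simp_all [List.append_assoc]; try omega)
      · have hdep' : (pvDepPkgs.any fun p => PySem.Str.isIn p (PySem.Str.lower (pvArgsOf x))) = false := by
          simpa using hdep
        have hd : isDep x = false := by
          simp only [isDep, isDepArgs, hr, Bool.true_and]; exact hdep'
        simp only [h1, beq_self_eq_true, if_true, List.countP_cons, hr, hc, hu, hh, hac,
          List.flatMap_cons, List.any_cons, pkgMsgs, depScan, hd, hdep', Bool.false_or,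
          Option.isNone_none, Option.isNone_some, Bool.true_and, Bool.false_and, Bool.and_true,
          Bool.and_false, if_true, if_false]
        cases dep <;> split_ifs <;>
          first
            | omega
            | rfl
            | (simp_all [List.append_assoc]; try omega)
    · have hr : isRun x = false := by simp [isRun, h1]
      have hp : pkgMsgs x = [] := by simp [pkgMsgs, hr]
      have hd : isDep x = false := by simp [isDep, hr]
      simp only [List.countP_cons, List.flatMap_cons, List.any_cons, hr, hp, hd, depScan,
        Bool.false_or, List.nil_append, List.append_nil, cond_false]
      have h1' : (pvInstOf x == "RUN") = false := by simp [h1]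
      rw [h1']
      by_cases h2 : pvInstOf x = "COPY"
      · have : isCopy x = true := by simp [isCopy, h2]
        have hu : isUser x = false := by simp [isUser, h2]
        have hh : isHealth x = false := by simp [isHealth, h2]
        have hac : isAddCopy x = true := by simp [isAddCopy, h2]
        cases dep <;>
          first
            | omega
            | rfl
            | (simp_all [List.append_assoc]; try omega)
      · by_cases h3 : pvInstOf x = "ADD"
        · have hc : isCopy x = false := by simp [isCopy, h3]
          have hu : isUser x = false := by simp [isUser, h3]
          have hh : isHealth x = false := by simp [isHealth, h3]
          have hac : isAddCopy x = true := by simp [isAddCopy, h3]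
          cases dep <;>
            first
              | omega
              | rfl
              | (simp_all [List.append_assoc]; try omega)
        · by_cases h4 : pvInstOf x = "USER"
          · have hc : isCopy x = false := by simp [isCopy, h4]
            have hu : isUser x = true := by simp [isUser, h4]
            have hh : isHealth x = false := by simp [isHealth, h4]
            have hac : isAddCopy x = false := by simp [isAddCopy, h4]
            cases dep <;>
              first
                | omega
                | rfl
                | (simp_all [List.append_assoc]; try omega)
          · by_cases h5 : pvInstOf x = "HEALTHCHECK"
            · have hc : isCopy x = false := by simp [isCopy, h5]
              have hu : isUser x = false := by simp [isUser, h5]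
              have hh : isHealth x = true := by simp [isHealth, h5]
              have hac : isAddCopy x = false := by simp [isAddCopy, h5]
              cases dep <;>
                first
                  | omega
                  | rfl
                  | (simp_all [List.append_assoc]; try omega)
            · have hc : isCopy x = false := by simp [isCopy, h2]
              have hu : isUser x = false := by simp [isUser, h4]
              have hh : isHealth x = false := by simp [isHealth, h5]
              have hac : isAddCopy x = false := by simp [isAddCopy, h2, h3]
              cases dep <;>
                first
                  | omega
                  | rfl
                  | (simp_all [List.append_assoc]; try omega)

theorem foldl_min_self (a : Int) (t : List Int) (h : ∀ b ∈ t, a ≤ b) : t.foldl min a = a := by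
  induction t with
  | nil => rfl
  | cons b t ih =>
    have hb : min a b = a := min_eq_left (h b (List.mem_cons_self))
    simp only [List.foldl_cons, hb]
    exact ih (fun c hc => h c (List.mem_cons_of_mem _ hc))

theorem min?_pairwise_head (xs : List Int) (h : xs.Pairwise (· < ·)) :
    PySem.List.min? xs (fun x => x) = xs.head? := by
  cases xs with
  | nil => simp [PySem.List.min?_eq_none_iff]
  | cons a t =>
    rw [PySem.List.min?_id_cons]
    have : t.foldl min a = a :=
      foldl_min_self a t (fun b hb => le_of_lt ((List.rel_of_pairwise_cons h) hb))
    rw [this]; rfl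

theorem head_idxs (P : List (String × String) → Bool) (l : List (List (String × String))) (n : Int) :
    ((((PySem.List.enumerate l n).filter (fun p => P p.2)).map (·.1)).head?) =
      (l.findIdx? P).map (fun (j : Nat) => n + (j : Int)) := by
  induction l generalizing n with
  | nil => simp [PySem.List.enumerate_nil]
  | cons x xs ih =>
    rw [PySem.List.enumerate_cons]
    by_cases h : P x = true
    · simp [h, List.findIdx?_cons]
    · simp only [List.filter_cons, h, if_neg, Bool.false_eq_true, not_false_iff, if_false,
        List.findIdx?_cons, ih (n + 1)]
      cases hfi : xs.findIdx? P <;> simp [hfi] <;> push_cast <;> ring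

theorem pairwise_idxs (P : List (String × String) → Bool) (l : List (List (String × String))) (n : Int) :
    ((((PySem.List.enumerate l n).filter (fun p => P p.2)).map (·.1))).Pairwise (· < ·) := by
  rw [List.pairwise_map]
  exact List.Pairwise.filter _ (PySem.List.pairwise_lt_enumerate l n)

theorem take_any_iff (P : List (String × String) → Bool) (l : List (List (String × String))) (j : Nat) :
    ((l.take j).any P = true) ↔ ∃ i, l.findIdx? P = some i ∧ i < j := by
  induction l generalizing j with
  | nil => simp
  | cons x xs ih =>
    cases j with
    | zero => simp
    | succ j' =>
      by_cases h : P x = true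
      · simp [h, List.findIdx?_cons]
      · simp [h, List.findIdx?_cons, ih]

theorem depScan_eq (sc : Bool) (l : List (List (String × String))) :
    depScan sc l = (l.findIdx? isDep).map (fun j => sc || (l.take j).any isCopy) := by
  induction l generalizing sc with
  | nil => simp [depScan]
  | cons x xs ih =>
    by_cases h : isDep x = true
    · simp [depScan, h, List.findIdx?_cons]
    · simp only [depScan, h, if_neg, Bool.false_eq_true, not_false_iff, if_false,
        List.findIdx?_cons, ih]
      cases hfi : xs.findIdx? isDep <;> simp [hfi, Bool.or_assoc]

theorem dIdx_eq (l : List (List (String × String))) :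
    ((((PySem.List.enumerate l 0).filter (fun p => isRun p.2)).map (·.1)).filter
        (fun i => pvDepPkgs.any (fun pkg => PySem.Str.isIn pkg (PySem.Str.lower (((PySem.List.pyGet? l i).map pvArgsOf).getD "")))))
      = (((PySem.List.enumerate l 0).filter (fun p => isDep p.2)).map (·.1)) := by
  rw [List.filter_map, List.filter_filter]
  congr 1
  apply List.filter_congr
  intro p hp
  obtain ⟨k, hk, rfl⟩ := (PySem.List.mem_enumerate_iff l 0 p).mp hp
  have hget : PySem.List.pyGet? l ((0 : Int) + (k : Int)) = some l[k] := by
    rw [zero_add]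
    simp [PySem.List.pyGet?_natCast, hk]
  simp only [Function.comp, hget]
  simp [isDep, isDepArgs, Bool.and_comm]

theorem idxs_nil_iff (P : List (String × String) → Bool) (l : List (List (String × String))) :
    ((((PySem.List.enumerate l 0).filter (fun p => P p.2)).map (·.1)) = []) ↔ l.findIdx? P = none := by
  rw [← List.head?_eq_none_iff, head_idxs]
  exact Option.map_eq_none_iff

theorem seg3_ite (l : List (List (String × String))) (s : List String) :
    (if !((((PySem.List.enumerate l 0).filter (fun p => isCopy p.2)).map (·.1)).isEmpty) &&
        !((((PySem.List.enumerate l 0).filter (fun p => isRun p.2)).map (·.1)).isEmpty) then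
      if !(((((PySem.List.enumerate l 0).filter (fun p => isRun p.2)).map (·.1)).filter
            (fun i => pvDepPkgs.any (fun pkg => PySem.Str.isIn pkg (PySem.Str.lower (((PySem.List.pyGet? l i).map pvArgsOf).getD ""))))).isEmpty) &&
          ((PySem.List.min? ((((PySem.List.enumerate l 0).filter (fun p => isCopy p.2)).map (·.1))) (fun x => x)).getD 0 <
            (PySem.List.min? (((((PySem.List.enumerate l 0).filter (fun p => isRun p.2)).map (·.1)).filter
              (fun i => pvDepPkgs.any (fun pkg => PySem.Str.isIn pkg (PySem.Str.lower (((PySem.List.pyGet? l i).map pvArgsOf).getD "")))))) (fun x => x)).getD 0)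
      then s ++ [msgCopyDep] else s
    else s)
    = (if (depScan false l).getD false = true then s ++ [msgCopyDep] else s) := by
  rw [dIdx_eq, depScan_eq]
  rw [min?_pairwise_head _ (pairwise_idxs isCopy l 0), min?_pairwise_head _ (pairwise_idxs isDep l 0)]
  rw [head_idxs isCopy l 0, head_idxs isDep l 0]
  cases hdep : l.findIdx? isDep with
  | none =>
    have hnil : (((PySem.List.enumerate l 0).filter (fun p => isDep p.2)).map (·.1)) = [] :=
      (idxs_nil_iff isDep l).mpr hdep
    simp [hnil]
  | some j =>
    have hdne : (((PySem.List.enumerate l 0).filter (fun p => isDep p.2)).map (·.1)) ≠ [] := by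
      intro hn
      rw [(idxs_nil_iff isDep l).mp hn] at hdep; cases hdep
    have hrne : (((PySem.List.enumerate l 0).filter (fun p => isRun p.2)).map (·.1)) ≠ [] := by
      intro hn
      have hnone := (idxs_nil_iff isRun l).mp hn
      obtain ⟨hlt, hPj, -⟩ := List.findIdx?_eq_some_iff_getElem.mp hdep
      have := (List.findIdx?_eq_none_iff.mp hnone) l[j] (List.getElem_mem _)
      rw [show isRun l[j] = true from Bool.and_elim_left (by simpa [isDep] using hPj)] at this
      cases this
    by_cases hcopy : (l.take j).any isCopy = true
    · obtain ⟨i, hifind, hij⟩ := (take_any_iff isCopy l j).mp hcopy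
      have hcne : (((PySem.List.enumerate l 0).filter (fun p => isCopy p.2)).map (·.1)) ≠ [] := by
        intro hn
        rw [(idxs_nil_iff isCopy l).mp hn] at hifind; cases hifind
      have hlt : ((i : Int) < (j : Int)) := by omega
      simp [hdep, hifind, hcopy, List.isEmpty_iff, hcne, hrne, hdne, hlt]
      rw [hifind]
      split_ifs with h1 h2
      · rfl
      · refine absurd ?_ h2
        simp [hlt]
        simpa using hdne
      · refine absurd ?_ h1
        simp
        exact ⟨by simpa using hcne, by simpa using hrne⟩
    · have hnotlt : ∀ i, l.findIdx? isCopy = some i → ¬ (i < j) := fun i hi hl =>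
        hcopy ((take_any_iff isCopy l j).mpr ⟨i, hi, hl⟩)
      cases hcfind : l.findIdx? isCopy with
      | none =>
        have hcnil := (idxs_nil_iff isCopy l).mpr hcfind
        simp [hcnil, hdep, hcopy]
      | some i =>
        have hin : ¬ ((i : Int) < (j : Int)) := by
          have := hnotlt i hcfind; omega
        simp [hdep, hcfind, hcopy, hin]

theorem ite_append_extract (c : Prop) [Decidable c] (s m : List String) :
    (if c then s ++ m else s) = s ++ (if c then m else []) := by
  split_ifs <;> simp

theorem aloop_eq : (fun (acc : List String) inst =>
      if pvInstOf inst == "RUN" then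
        let args := PySem.Str.lower (pvArgsOf inst)
        let acc := if PySem.Str.isIn "apt-get install" args && !(PySem.Str.isIn "rm -rf /var/lib/apt/lists/*" args) then acc ++ [msgApt] else acc
        if PySem.Str.isIn "yum install" args && !(PySem.Str.isIn "yum clean all" args) then acc ++ [msgYum] else acc
      else acc) = fun acc x => acc ++ pkgMsgs x := by
  funext acc x
  by_cases h : pvInstOf x = "RUN"
  · simp only [h, beq_self_eq_true, if_true, pkgMsgs, isRun]
    split_ifs <;> simp [List.append_assoc]
  · have h' : (pvInstOf x == "RUN") = false := by simp [h]
    simp [h', pkgMsgs, isRun]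

theorem suggest_optimizations_py_spec : Claim_equal_suggest_optimizations_py := by
  unfold Claim_equal_suggest_optimizations_py
  intro instructions layers _dom _pre
  unfold Spec_suggest_optimizations_py
  show suggest_optimizations_py instructions layers = suggest_optimizations_py_alt instructions layers
  simp only [suggest_optimizations_py, suggest_optimizations_py_alt]
  rw [foldl_bstep]
  have e1 : (fun (i : List (String × String)) => pvInstOf i == "RUN") = isRun := rfl
  have e2 : (fun (p : Int × List (String × String)) => pvInstOf p.2 == "RUN") = (fun p => isRun p.2) := rfl
  have e3 : (fun (p : Int × List (String × String)) => pvInstOf p.2 == "COPY") = (fun p => isCopy p.2) := rfl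
  have e4 : (fun (i : List (String × String)) => pvInstOf i == "USER") = isUser := rfl
  have e5 : (fun (i : List (String × String)) => pvInstOf i == "HEALTHCHECK") = isHealth := rfl
  have e6 : (fun (i : List (String × String)) => (["ADD", "COPY"] : List String).contains (pvInstOf i)) = isAddCopy := rfl
  rw [aloop_eq, PySem.List.foldl_append_eq_flatMap, e1, e2, e3, e4, e5, e6]
  rw [seg3_ite]
  simp only [ite_append_extract, Nat.zero_add, List.nil_append, Bool.false_or,
    List.countP_eq_length_filter, List.append_assoc]
  split_ifs <;> simp [List.append_assoc]
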